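-- pv_equiv track=rewrite | github.com/jong129/team2_python | fastapi/main_chat.py | make_context_from_hits
-- ===== SOURCE A (Python) =====
-- from typing import List, Optional, Dict, Any
--
-- def make_context_from_hits(hits: List[Dict[str, Any]], max_chars: int = 3500) -> str:
--     chunks = []
--     total = 0
--     for h in hits:
--         t = h["text"].strip()
--         if not t:
--             continue
--         piece = f"- {t}"
--         if total + len(piece) + 1 > max_chars:
--             break
--         chunks.append(piece)
--         total += len(piece) + 1
--     return "\n".join(chunks).strip()
-- ===== SOURCE B (Python) =====
-- from itertools import accumulate, takewhile
-- from typing import List, Dict, Any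
--
-- def make_context_from_hits(hits: List[Dict[str, Any]], max_chars: int = 3500) -> str:
--     pieces = [f"- {t}" for h in hits if (t := h["text"].strip())]
--     sums = accumulate(len(p) + 1 for p in pieces)
--     k = sum(1 for _ in takewhile(lambda s: s <= max_chars, sums))
--     return "\n".join(pieces[:k]).strip()
-- ===== Notes on version B (the rewrite author's own statement) =====
-- stated objective: alternative
-- what changed: Replaces the imperative running-total-with-break loop by a declarative pipeline: filter/format all pieces first, take a prefix-sum of their weights (len+1), count the leading sums that stay <= max_chars, slice and join.
-- outside the precondition, e.g. on make_context_from_hits([{'text': 'a'}, {}], 0): A returns '', B raises KeyError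
import Mathlib
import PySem

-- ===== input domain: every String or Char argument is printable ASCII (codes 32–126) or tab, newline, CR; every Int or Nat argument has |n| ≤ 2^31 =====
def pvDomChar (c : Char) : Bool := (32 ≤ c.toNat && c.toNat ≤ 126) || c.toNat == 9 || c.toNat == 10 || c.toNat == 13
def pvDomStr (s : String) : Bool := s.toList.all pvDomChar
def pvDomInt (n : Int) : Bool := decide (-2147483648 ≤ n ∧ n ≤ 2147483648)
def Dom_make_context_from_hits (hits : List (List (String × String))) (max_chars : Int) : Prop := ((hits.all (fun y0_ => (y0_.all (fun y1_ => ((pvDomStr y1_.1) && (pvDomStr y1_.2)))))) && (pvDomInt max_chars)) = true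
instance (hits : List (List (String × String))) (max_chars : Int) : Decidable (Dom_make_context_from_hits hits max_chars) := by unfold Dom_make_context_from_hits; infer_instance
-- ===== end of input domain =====

-- B rebuilds A's greedy loop as a declarative pipeline (format all pieces, prefix-sum the
-- weights, count leading sums ≤ max_chars, slice and join); equal return value on Pre_.

-- ===== PORT A =====
-- the for-loop with `continue`/`break`, carrying `total` and `chunks`;
-- on a hit without the "text" key Python raises KeyError (excluded by Pre_), the port stops with the chunks so far
def pvLoopA (max_chars : Int) : List (List (String × String)) → Int → List String → List String
  | [], _, chunks => chunks
  | h :: rest, total, chunks =>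
    match PySem.Dict.get? (PySem.Dict.mk h) "text" with
    | none => chunks
    | some v =>
      let t := PySem.Str.strip v
      if t = "" then pvLoopA max_chars rest total chunks
      else
        let piece := "- " ++ t
        if total + PySem.Str.len piece + 1 > max_chars then chunks
        else pvLoopA max_chars rest (total + PySem.Str.len piece + 1) (chunks ++ [piece])

def make_context_from_hits (hits : List (List (String × String))) (max_chars : Int) : String :=
  PySem.Str.strip (PySem.Str.join "\n" (pvLoopA max_chars hits 0 []))

-- ===== PORT B =====
-- pieces = [f"- {t}" for h in hits if (t := h["text"].strip())]  (missing "text" key: skipped; Python B raises there, outside Pre_)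
def pvPieces (hits : List (List (String × String))) : List String :=
  hits.filterMap (fun h =>
    (PySem.Dict.get? (PySem.Dict.mk h) "text").bind (fun v =>
      let t := PySem.Str.strip v
      if t = "" then none else some ("- " ++ t)))

-- itertools.accumulate of the weights, starting from s
def pvAccum (s : Int) : List Int → List Int
  | [] => []
  | w :: ws => (s + w) :: pvAccum (s + w) ws

def make_context_from_hits_alt (hits : List (List (String × String))) (max_chars : Int) : String :=
  let pieces := pvPieces hits
  let sums := pvAccum 0 (pieces.map (fun p => PySem.Str.len p + 1))
  let k := (sums.takeWhile (fun s => decide (s ≤ max_chars))).length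
  PySem.Str.strip (PySem.Str.join "\n" (pieces.take k))

-- ===== PRECONDITION & SPEC =====
-- Pre_ excludes hits lists containing a dict without the "text" key: Python A raises KeyError on
-- any such dict it reaches (A may still return if it breaks first, but Python B always raises there).
def Pre_make_context_from_hits (hits : List (List (String × String))) (max_chars : Int) : Prop :=
  ∀ h ∈ hits, ((PySem.Dict.mk h).get? "text").isSome = true

instance (hits : List (List (String × String))) (max_chars : Int) : Decidable (Pre_make_context_from_hits hits max_chars) := by unfold Pre_make_context_from_hits; infer_instance

def pvWitness_make_context_from_hits : (List (List (String × String))) × Int :=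
  ([[("text", " hello ")], [("text", "")], [("text", "world")]], 12)

def Spec_make_context_from_hits (hits : List (List (String × String))) (max_chars : Int) (out : String) : Prop := out = make_context_from_hits_alt hits max_chars
instance (hits : List (List (String × String))) (max_chars : Int) (out : String) : Decidable (Spec_make_context_from_hits hits max_chars out) := by unfold Spec_make_context_from_hits; infer_instance

-- ===== CLAIM (what is proved, stated in full; the proofs are below) =====
def Claim_equal_make_context_from_hits : Prop := ∀ (hits : List (List (String × String))) (max_chars : Int), Dom_make_context_from_hits hits max_chars → Pre_make_context_from_hits hits max_chars → Spec_make_context_from_hits hits max_chars (make_context_from_hits hits max_chars)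

-- ===== LEMMAS AND PROOFS =====

-- pvPieces on a cons, the two cases
theorem pvPieces_cons_skip (h : List (String × String)) (rest : List (List (String × String)))
    (v : String) (hv : (PySem.Dict.mk h).get? "text" = some v) (ht : PySem.Str.strip v = "") :
    pvPieces (h :: rest) = pvPieces rest := by
  simp [pvPieces, hv, ht]

theorem pvPieces_cons_keep (h : List (String × String)) (rest : List (List (String × String)))
    (v : String) (hv : (PySem.Dict.mk h).get? "text" = some v) (ht : ¬ PySem.Str.strip v = "") :
    pvPieces (h :: rest) = ("- " ++ PySem.Str.strip v) :: pvPieces rest := by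
  simp [pvPieces, hv, ht]

-- the greedy loop equals "take the prefix of pieces whose running sums (from `total`) stay ≤ max_chars"
theorem pvLoopA_eq (M : Int) :
    ∀ (hits : List (List (String × String))) (total : Int) (chunks : List String),
      (∀ h ∈ hits, ((PySem.Dict.mk h).get? "text").isSome = true) →
      pvLoopA M hits total chunks =
        chunks ++ (pvPieces hits).take
          (((pvAccum total ((pvPieces hits).map (fun p => PySem.Str.len p + 1))).takeWhile
            (fun s => decide (s ≤ M))).length) := by
  intro hits
  induction hits with
  | nil => intro total chunks _; simp [pvLoopA, pvPieces, pvAccum]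
  | cons h rest ih =>
    intro total chunks hpre
    have hh : ((PySem.Dict.mk h).get? "text").isSome = true := hpre h (by simp)
    obtain ⟨v, hv⟩ := Option.isSome_iff_exists.mp hh
    have hrest : ∀ h' ∈ rest, ((PySem.Dict.mk h').get? "text").isSome = true :=
      fun h' hm => hpre h' (by simp [hm])
    by_cases ht : PySem.Str.strip v = ""
    · rw [pvPieces_cons_skip h rest v hv ht]
      simp only [pvLoopA, hv]
      rw [if_pos ht, ih total chunks hrest]
    · rw [pvPieces_cons_keep h rest v hv ht]
      simp only [pvLoopA, hv]
      rw [if_neg ht]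
      simp only [List.map_cons, pvAccum, List.takeWhile_cons, decide_eq_true_eq]
      by_cases hb : total + PySem.Str.len ("- " ++ PySem.Str.strip v) + 1 > M
      · rw [if_pos hb]
        rw [if_neg (by omega : ¬ (total + (PySem.Str.len ("- " ++ PySem.Str.strip v) + 1) ≤ M))]
        simp
      · rw [if_neg hb]
        rw [if_pos (by omega : total + (PySem.Str.len ("- " ++ PySem.Str.strip v) + 1) ≤ M)]
        rw [ih _ _ hrest]
        have : total + (PySem.Str.len ("- " ++ PySem.Str.strip v) + 1)
            = total + PySem.Str.len ("- " ++ PySem.Str.strip v) + 1 := by ring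
        rw [this]
        simp [List.take_succ_cons, List.append_assoc]

-- ===== VERDICT (by name: the statement is the Claim_ definition above) =====
theorem make_context_from_hits_spec : Claim_equal_make_context_from_hits := by
  intro hits max_chars _ hpre
  unfold Spec_make_context_from_hits make_context_from_hits make_context_from_hits_alt
  rw [pvLoopA_eq max_chars hits 0 [] hpre]
  simp
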